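-- pv_equiv track=rewrite | github.com/heejin42/study_algorithm | hackerrank/softeer/2_연탄의크기.py | solution
-- ===== SOURCE A (Python) =====
-- def solution(n, fires):
--     answer = 0
--     fires.sort(reverse=True)
--     for i in range(2, fires[0]+1):
--         count = 0
--         for fire in fires:
--             if fire < i:
--                 break
--             if fire%i == 0:
--                 count += 1
--         answer = max(answer, count)
--     return answer
-- ===== SOURCE B (Python) =====
-- def solution(n, fires):
--     m = max(fires)
--     if m < 2:
--         return 0
--     freq = {}
--     for f in fires:
--         if f >= 2:
--             freq[f] = freq.get(f, 0) + 1
--     best = 0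
--     for i in range(2, m + 1):
--         c = 0
--         for j in range(i, m + 1, i):
--             c += freq.get(j, 0)
--         best = max(best, c)
--     return best
-- ===== Notes on version B (the rewrite author's own statement) =====
-- stated objective: faster
-- what changed: Instead of re-scanning the whole descending-sorted list for every candidate size i, B builds a frequency dictionary of the fires once and, for each i, sums the counts of the multiples of i with a harmonic sieve (and never sorts).
import Mathlib
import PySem

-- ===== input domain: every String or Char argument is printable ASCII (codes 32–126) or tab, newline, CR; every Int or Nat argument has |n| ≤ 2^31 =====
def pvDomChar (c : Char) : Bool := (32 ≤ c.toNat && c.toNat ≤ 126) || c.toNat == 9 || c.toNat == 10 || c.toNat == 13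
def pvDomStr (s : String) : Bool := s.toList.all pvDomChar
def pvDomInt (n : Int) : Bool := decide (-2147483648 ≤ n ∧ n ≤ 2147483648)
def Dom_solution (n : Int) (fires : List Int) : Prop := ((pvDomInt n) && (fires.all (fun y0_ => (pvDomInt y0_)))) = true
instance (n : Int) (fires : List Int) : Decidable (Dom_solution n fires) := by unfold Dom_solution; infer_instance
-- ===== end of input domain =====

-- B replaces A's rescan of the whole (descending-sorted) list for every candidate size i by a
-- frequency dictionary plus a harmonic sieve over the multiples of i (objective: faster).
-- Note: A sorts `fires` in place (observable mutation); B does not mutate. The claim is about the return value.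

-- ===== PORT A =====
-- inner loop 'for fire in fires: if fire < i: break; if fire % i == 0: count += 1'
def pvCountA (i count : Int) : List Int → Int
  | [] => count
  | f :: rest =>
      if f < i then count
      else if PySem.Int.mod f i = 0 then pvCountA i (count + 1) rest
      else pvCountA i count rest

def solution (n : Int) (fires : List Int) : Int :=
  let s := PySem.List.sorted fires (fun x => x) true
  (PySem.List.pyRange 2 (PySem.List.pyGetD s 0 0 + 1) 1).foldl
    (fun answer i => max answer (pvCountA i 0 s)) 0

-- ===== PORT B =====
def solution_alt (n : Int) (fires : List Int) : Int :=
  match PySem.List.max? fires (fun x => x) with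
  | none => 0   -- unreachable under Pre_solution: Python's max([]) raises ValueError
  | some m =>
    if m < 2 then 0
    else
      let freq := fires.foldl
        (fun d f => if 2 ≤ f then d.insert f (d.getD f 0 + 1) else d)
        (PySem.Dict.empty : PySem.Dict Int Int)
      (PySem.List.pyRange 2 (m + 1) 1).foldl
        (fun best i =>
          max best ((PySem.List.pyRange i (m + 1) i).foldl (fun c j => c + freq.getD j 0) 0)) 0

-- ===== PRECONDITION & SPEC =====
-- A evaluates fires[0] (and B max(fires)): both raise on an empty list, so Pre_ excludes exactly [].
def Pre_solution (n : Int) (fires : List Int) : Prop := fires ≠ []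
instance (n : Int) (fires : List Int) : Decidable (Pre_solution n fires) := by unfold Pre_solution; infer_instance
def pvWitness_solution : Int × List Int := (3, [3, 6, 2])

def Spec_solution (n : Int) (fires : List Int) (out : Int) : Prop := out = solution_alt n fires
instance (n : Int) (fires : List Int) (out : Int) : Decidable (Spec_solution n fires out) := by unfold Spec_solution; infer_instance

-- ===== CLAIM (what is proved, stated in full; the proofs are below) =====
def Claim_equal_solution : Prop := ∀ (n : Int) (fires : List Int), Dom_solution n fires → Pre_solution n fires → Spec_solution n fires (solution n fires)

-- ===== LEMMAS AND PROOFS =====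

-- the frequency dictionary looks up the multiplicity among the fires ≥ 2
theorem pvFreq_getD (l : List Int) (d : PySem.Dict Int Int) (v : Int) :
    (l.foldl (fun d f => if 2 ≤ f then d.insert f (d.getD f 0 + 1) else d) d).getD v 0
      = d.getD v 0 + ((l.filter (fun f => 2 ≤ f)).count v : Int) := by
  induction l generalizing d with
  | nil => simp
  | cons f t ih =>
      simp only [List.foldl_cons, List.filter_cons]
      by_cases h2 : (2:Int) ≤ f
      · rw [if_pos (by exact h2), if_pos (by simpa using h2), ih,
          PySem.Dict.getD_insert]
        by_cases hv : v = f
        · subst hv; simp; omega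
        · simp [hv, Ne.symm hv]
      · rw [if_neg h2, if_neg (by simpa using h2), ih]

-- sum over a duplicate-free list of an equality indicator
theorem pvSum_indicator (R : List Int) (f : Int) (h : R.Nodup) :
    ((R.map (fun j => if f = j then (1:Int) else 0)).sum) = if f ∈ R then 1 else 0 := by
  induction R with
  | nil => simp
  | cons j t ih =>
      simp only [List.map_cons, List.sum_cons, List.mem_cons]
      rcases List.nodup_cons.mp h with ⟨hj, ht⟩
      by_cases hf : f = j
      · subst hf
        rw [ih ht]
        simp [hj]
      · rw [ih ht]
        simp [hf]

-- summing the multiplicities over a duplicate-free list of values counts the members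
theorem pvSum_count (R l : List Int) (h : R.Nodup) :
    (R.map (fun j => (l.count j : Int))).sum = ((l.countP (fun f => decide (f ∈ R))) : Int) := by
  induction l with
  | nil => simp
  | cons f t ih =>
      have : (R.map (fun j => ((f :: t).count j : Int)))
          = R.map (fun j => (t.count j : Int) + if f = j then 1 else 0) := by
        apply List.map_congr_left
        intro j _
        by_cases hj : f = j
        · subst hj; simp
        · simp [hj]
      rw [this, PySem.List.sum_map_add_int, ih, pvSum_indicator R f h,
        List.countP_cons]
      by_cases hf : f ∈ R <;> simp [hf]

-- A's break-loop over a descending list counts the elements ≥ i divisible by i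
theorem pvCountA_eq_countP (i c : Int) (l : List Int)
    (h : List.Pairwise (fun a b => b ≤ a) l) :
    pvCountA i c l = c + ((l.countP (fun f => decide (i ≤ f) && decide (PySem.Int.mod f i = 0))) : Int) := by
  induction l generalizing c with
  | nil => simp [pvCountA]
  | cons f t ih =>
      rcases List.pairwise_cons.mp h with ⟨hall, ht⟩
      by_cases hlt : f < i
      · have hz : (f :: t).countP (fun f => decide (i ≤ f) && decide (PySem.Int.mod f i = 0)) = 0 := by
          rw [List.countP_eq_zero]
          intro a ha
          rcases List.mem_cons.mp ha with rfl | ha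
          · simp; omega
          · have := hall a ha
            simp; omega
        simp [pvCountA, hlt, hz]
      · by_cases hm : PySem.Int.mod f i = 0
        · simp only [pvCountA, if_neg hlt, if_pos hm, ih _ ht, List.countP_cons]
          simp [hm, show i ≤ f by omega]
          omega
        · simp only [pvCountA, if_neg hlt, if_neg hm, ih _ ht, List.countP_cons]
          simp [hm]

-- the stepped range of multiples has no duplicates
theorem pvNodup_multiples (i b : Int) (hi : 0 < i) : (PySem.List.pyRange i b i).Nodup := by
  rw [PySem.List.pyRange_of_pos _ _ hi]
  apply List.Nodup.map _ (List.nodup_range)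
  intro k1 k2 hk
  simp only at hk
  have h2 := mul_left_cancel₀ (show (i:Int) ≠ 0 by omega) (add_left_cancel hk)
  exact_mod_cast h2

-- the per-candidate value: B's sieve sum equals A's scan count
theorem pvSieve_eq (fires : List Int) (m i : Int)
    (hmax : ∀ f ∈ fires, f ≤ m) (hi : 2 ≤ i) :
    (PySem.List.pyRange i (m + 1) i).foldl
        (fun c j => c + (fires.foldl
          (fun d f => if 2 ≤ f then d.insert f (d.getD f 0 + 1) else d)
          (PySem.Dict.empty : PySem.Dict Int Int)).getD j 0) 0
      = ((fires.countP (fun f => decide (i ≤ f) && decide (PySem.Int.mod f i = 0))) : Int) := by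
  rw [PySem.List.foldl_add]
  have hR : (PySem.List.pyRange i (m + 1) i).Nodup := pvNodup_multiples i (m + 1) (by omega)
  have hmap : (PySem.List.pyRange i (m + 1) i).map
      (fun j => (fires.foldl
          (fun d f => if 2 ≤ f then d.insert f (d.getD f 0 + 1) else d)
          (PySem.Dict.empty : PySem.Dict Int Int)).getD j 0)
      = (PySem.List.pyRange i (m + 1) i).map
          (fun j => (((fires.filter (fun f => 2 ≤ f)).count j : Int))) := by
    apply List.map_congr_left
    intro j _
    rw [pvFreq_getD]
    simp [PySem.Dict.getD, PySem.Dict.empty, PySem.Dict.get?]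
  rw [hmap, pvSum_count _ _ hR, List.countP_filter]
  rw [zero_add]
  norm_cast
  apply List.countP_congr
  intro f hf
  simp only [Bool.and_eq_true, decide_eq_true_eq, PySem.List.mem_pyRange_iff_of_pos (by omega : (0:Int) < i),
    PySem.Int.mod_eq_zero_iff_dvd]
  constructor
  · rintro ⟨⟨h1, _, h3⟩, _⟩
    refine ⟨h1, ?_⟩
    have : i ∣ (f - i) + i := Dvd.dvd.add h3 dvd_rfl
    simpa using this
  · rintro ⟨h1, h2⟩
    have hfm := hmax f hf
    exact ⟨⟨h1, by omega, (Int.dvd_sub h2 dvd_rfl)⟩, by omega⟩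

-- ===== VERDICT (by name: the statement is the Claim_ definition above) =====
theorem solution_spec : Claim_equal_solution := by
  intro n fires _ hpre
  unfold Spec_solution solution solution_alt
  obtain ⟨m, hm⟩ : ∃ m, PySem.List.max? fires (fun x => x) = some m := by
    cases h : PySem.List.max? fires (fun x => x) with
    | none => exact absurd ((PySem.List.max?_eq_none_iff fires _).mp h) hpre
    | some m => exact ⟨m, rfl⟩
  have hmax : ∀ f ∈ fires, f ≤ m := PySem.List.max?_isMax hm
  rw [hm]
  -- the head of the descending sort is the maximum
  obtain ⟨h0, t, hs⟩ : ∃ h0 t, PySem.List.sorted fires (fun x => x) true = h0 :: t := by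
    cases h : PySem.List.sorted fires (fun x => x) true with
    | nil => exact absurd ((PySem.List.sorted_eq_nil_iff fires _ _).mp h) hpre
    | cons h0 t => exact ⟨h0, t, rfl⟩
  have hh0m : h0 = m := by
    have h1 : h0 ≤ m := hmax h0 ((PySem.List.mem_sorted fires _ _ h0).mp (by rw [hs]; simp))
    have h2 : m ≤ h0 := PySem.List.key_head_sorted_rev_ge fires (fun x => x) hs m (PySem.List.max?_mem hm)
    omega
  rw [hh0m] at hs
  simp only [hs, PySem.List.pyGetD_zero_cons]
  by_cases hm2 : m < 2
  · rw [if_pos hm2, PySem.List.pyRange_one_eq_nil (by omega)]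
    simp
  · rw [if_neg hm2]
    apply PySem.List.foldl_congr_mem
    intro acc i hi
    have hi2 : 2 ≤ i := ((PySem.List.mem_pyRange_one).mp hi).1
    congr 1
    have hpw : List.Pairwise (fun a b => b ≤ a) (m :: t) := by
      have := PySem.List.sorted_pairwise_rev fires (fun x => x)
      rwa [hs] at this
    have hperm : (m :: t).Perm fires := by
      have := PySem.List.sorted_perm fires (fun x => x) true
      rwa [hs] at this
    rw [pvCountA_eq_countP i 0 _ hpw, zero_add,
      hperm.countP_eq (fun f => decide (i ≤ f) && decide (PySem.Int.mod f i = 0))]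
    exact (pvSieve_eq fires m i hmax hi2).symm
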